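-- pv_equiv track=rewrite | github.com/Afei99357/nifi_to_databricks | tools/improved_pruning.py | _assess_migration_priority
-- ===== SOURCE A (Python) =====
-- from typing import Any, Dict, List
--
-- def _assess_migration_priority(chains: List[Dict[str, Any]]) -> str:
--     """Assess migration priority based on business patterns."""
--     high_priority_patterns = [
--         "stream_processing",
--         "database_transformation",
--         "api_processing",
--     ]
--     medium_priority_patterns = [
--         "file_ingestion",
--         "stream_ingestion",
--         "database_export",
--     ]
--
--     patterns = [chain.get("business_pattern", "") for chain in chains]
--
--     if any(p in high_priority_patterns for p in patterns):
--         return "high"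
--     elif any(p in medium_priority_patterns for p in patterns):
--         return "medium"
--     else:
--         return "low"
-- ===== SOURCE B (Python) =====
-- from typing import Any, Dict, List
--
-- _RANK = {
--     "stream_processing": 2,
--     "database_transformation": 2,
--     "api_processing": 2,
--     "file_ingestion": 1,
--     "stream_ingestion": 1,
--     "database_export": 1,
-- }
--
-- def _assess_migration_priority(chains: List[Dict[str, Any]]) -> str:
--     """Assess migration priority based on business patterns."""
--     m = max((_RANK.get(chain.get("business_pattern", ""), 0) for chain in chains),
--             default=0)
--     return "high" if m == 2 else "medium" if m == 1 else "low"
-- ===== Notes on version B (the rewrite author's own statement) =====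
-- stated objective: simpler
-- what changed: Replaces the two ordered any()-membership passes over the patterns list with a single max-reduction over a priority-rank lookup table, mapping the numeric maximum back to its label.
import Mathlib
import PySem

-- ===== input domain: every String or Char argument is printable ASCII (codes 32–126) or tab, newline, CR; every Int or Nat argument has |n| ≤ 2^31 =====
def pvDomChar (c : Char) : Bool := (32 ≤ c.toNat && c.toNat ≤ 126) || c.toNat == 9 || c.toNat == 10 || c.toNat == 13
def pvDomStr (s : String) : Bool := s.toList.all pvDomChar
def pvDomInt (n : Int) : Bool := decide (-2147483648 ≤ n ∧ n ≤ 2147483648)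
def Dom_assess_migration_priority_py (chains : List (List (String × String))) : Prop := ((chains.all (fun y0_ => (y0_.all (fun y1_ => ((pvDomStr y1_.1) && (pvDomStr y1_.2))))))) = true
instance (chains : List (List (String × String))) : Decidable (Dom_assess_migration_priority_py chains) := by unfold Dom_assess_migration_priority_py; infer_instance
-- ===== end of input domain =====

-- B replaces A's two ordered any()-membership passes with a single max-reduction over a rank lookup table (objective: simpler).


-- ===== PORT A =====
def pvHighPatterns : List String :=
  ["stream_processing", "database_transformation", "api_processing"]
def pvMediumPatterns : List String :=
  ["file_ingestion", "stream_ingestion", "database_export"]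

def assess_migration_priority_py (chains : List (List (String × String))) : String :=
  let patterns := chains.map (fun chain => (PySem.Dict.mk chain).getD "business_pattern" "")
  if patterns.any (fun p => pvHighPatterns.contains p) then "high"
  else if patterns.any (fun p => pvMediumPatterns.contains p) then "medium"
  else "low"

-- ===== PORT B =====
def pvRank : PySem.Dict String Int :=
  PySem.Dict.mk
    [("stream_processing", 2), ("database_transformation", 2), ("api_processing", 2),
     ("file_ingestion", 1), ("stream_ingestion", 1), ("database_export", 1)]

def assess_migration_priority_py_alt (chains : List (List (String × String))) : String :=
  let m := chains.foldl
    (fun acc chain => max acc (pvRank.getD ((PySem.Dict.mk chain).getD "business_pattern" "") 0)) 0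
  if m == 2 then "high" else if m == 1 then "medium" else "low"

-- ===== PRECONDITION & SPEC =====
def Spec_assess_migration_priority_py (chains : List (List (String × String))) (out : String) : Prop := out = assess_migration_priority_py_alt chains
instance (chains : List (List (String × String))) (out : String) : Decidable (Spec_assess_migration_priority_py chains out) := by unfold Spec_assess_migration_priority_py; infer_instance

-- ===== CLAIM (what is proved, stated in full; the proofs are below) =====
def Claim_equal_assess_migration_priority_py : Prop := ∀ (chains : List (List (String × String))), Dom_assess_migration_priority_py chains → Spec_assess_migration_priority_py chains (assess_migration_priority_py chains)

-- ===== LEMMAS AND PROOFS =====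

-- the pattern a chain contributes
def pvPat (chain : List (String × String)) : String :=
  (PySem.Dict.mk chain).getD "business_pattern" ""

-- the tier value A's two ordered membership passes encode
def pvTier (chains : List (List (String × String))) : Int :=
  if chains.any (fun c => pvHighPatterns.contains (pvPat c)) then 2
  else if chains.any (fun c => pvMediumPatterns.contains (pvPat c)) then 1
  else 0

-- B's rank table agrees with A's two pattern lists
lemma rank_eq (p : String) :
    pvRank.getD p 0 =
      (if pvHighPatterns.contains p then 2
       else if pvMediumPatterns.contains p then 1 else 0) := by
  by_cases h1 : p = "stream_processing"
  · subst h1; decide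
  by_cases h2 : p = "database_transformation"
  · subst h2; decide
  by_cases h3 : p = "api_processing"
  · subst h3; decide
  by_cases h4 : p = "file_ingestion"
  · subst h4; decide
  by_cases h5 : p = "stream_ingestion"
  · subst h5; decide
  by_cases h6 : p = "database_export"
  · subst h6; decide
  simp [pvRank, pvHighPatterns, pvMediumPatterns, PySem.Dict.getD_eq_get?_getD,
    PySem.Dict.get?, Ne.symm h1, Ne.symm h2, Ne.symm h3,
    Ne.symm h4, Ne.symm h5, Ne.symm h6, h1, h2, h3, h4, h5, h6]

lemma rank_nonneg (p : String) : 0 ≤ pvRank.getD p 0 := by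
  rw [rank_eq]; split_ifs <;> omega

lemma tier_cons (c : List (String × String)) (l : List (List (String × String))) :
    pvTier (c :: l) = max (pvRank.getD (pvPat c) 0) (pvTier l) := by
  rw [rank_eq]
  unfold pvTier
  cases h1 : pvHighPatterns.contains (pvPat c) <;>
    cases h2 : pvMediumPatterns.contains (pvPat c) <;>
      simp_all [List.any_cons] <;> split_ifs <;> simp_all

-- B's max-fold computes the tier, for any nonnegative accumulator
lemma fold_max_tier (chains : List (List (String × String))) (a : Int) (ha : 0 ≤ a) :
    chains.foldl (fun acc chain => max acc (pvRank.getD (pvPat chain) 0)) a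
      = max a (pvTier chains) := by
  induction chains generalizing a with
  | nil => simp [pvTier]; omega
  | cons c l ih =>
    have hr := rank_nonneg (pvPat c)
    rw [List.foldl_cons, ih (max a (pvRank.getD (pvPat c) 0)) (by omega), tier_cons]
    omega

-- ===== VERDICT (by name: the statement is the Claim_ definition above) =====
theorem assess_migration_priority_py_spec : Claim_equal_assess_migration_priority_py := by
  intro chains _
  unfold Spec_assess_migration_priority_py assess_migration_priority_py assess_migration_priority_py_alt
  simp only [List.any_map, Function.comp_def]
  change (if chains.any (fun c => pvHighPatterns.contains (pvPat c)) then "high"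
      else if chains.any (fun c => pvMediumPatterns.contains (pvPat c)) then "medium"
      else "low")
    = (if (chains.foldl (fun acc c => max acc (pvRank.getD (pvPat c) 0)) 0) == 2 then "high"
       else if (chains.foldl (fun acc c => max acc (pvRank.getD (pvPat c) 0)) 0) == 1 then "medium"
       else "low")
  rw [fold_max_tier chains 0 le_rfl]
  unfold pvTier
  cases hh : chains.any (fun c => pvHighPatterns.contains (pvPat c)) <;>
    cases hm : chains.any (fun c => pvMediumPatterns.contains (pvPat c)) <;>
      simp_all
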